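-- pv_equiv track=rewrite | github.com/ChristopherGroch/15Puzzle_Solver | Script code/State.py | good_moves
-- ===== SOURCE A (Python) =====
-- order = "RLDU"
--
-- def good_moves(cord, last_move):
--     badMoves = ""
--     if cord['r'] == 0:
--         badMoves += 'U'
--     if cord['r'] == 3:
--         badMoves += 'D'
--     if cord['c'] == 0:
--         badMoves += "L"
--     if cord['c'] == 3:
--         badMoves += 'R'
--     if last_move != "":
--         if last_move == 'R':
--             badMoves += 'L'
--         elif last_move == "L":
--             badMoves += 'R'
--         elif last_move == 'U':
--             badMoves += 'D'
--         elif last_move == 'D':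
--             badMoves += 'U'
--
--     properMoves = ""
--
--     for i in order:
--         if i in badMoves:
--             continue
--         properMoves += i
--
--     return properMoves
-- ===== SOURCE B (Python) =====
-- _TAB = ("", "U", "D", "DU", "L", "LU", "LD", "LDU",
--         "R", "RU", "RD", "RDU", "RL", "RLU", "RLD", "RLDU")
--
-- def good_moves(cord, last_move):
--     r, c = cord['r'], cord['c']
--     i = ((c != 3 and last_move != 'L') * 8
--          + (c != 0 and last_move != 'R') * 4
--          + (r != 3 and last_move != 'U') * 2
--          + (r != 0 and last_move != 'D') * 1)
--     return _TAB[i]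
-- ===== Notes on version B (the rewrite author's own statement) =====
-- stated objective: alternative
-- what changed: Replaced A's build-a-badMoves-string-then-filter-the-order-string loop by a loop-free closed form: four boolean conditions are combined into a 4-bit index that selects the answer from a precomputed 16-entry table of result strings.
import Mathlib
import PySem

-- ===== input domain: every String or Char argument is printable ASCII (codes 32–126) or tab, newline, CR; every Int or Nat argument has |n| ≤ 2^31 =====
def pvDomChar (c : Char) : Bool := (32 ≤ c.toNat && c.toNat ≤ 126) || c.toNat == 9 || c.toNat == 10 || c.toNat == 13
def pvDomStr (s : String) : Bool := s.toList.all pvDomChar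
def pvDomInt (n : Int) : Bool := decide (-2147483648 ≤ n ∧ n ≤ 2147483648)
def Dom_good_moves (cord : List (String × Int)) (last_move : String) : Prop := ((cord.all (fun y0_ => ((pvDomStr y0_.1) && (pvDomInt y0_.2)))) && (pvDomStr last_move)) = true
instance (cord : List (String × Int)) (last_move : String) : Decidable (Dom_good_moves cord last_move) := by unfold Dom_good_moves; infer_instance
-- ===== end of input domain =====

-- B replaces A's build-badMoves-then-filter loop by a loop-free closed form: a 4-bit index
-- computed from the four conditions selects the answer from a 16-entry table (objective: alternative).

-- ===== PORT A =====
-- cord['r'] / cord['c'] are first-match dict lookups; Pre_ guarantees the keys exist, so getD's default is never used.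
def good_moves (cord : List (String × Int)) (last_move : String) : String :=
  let r := ((PySem.Dict.mk cord).get? "r").getD 0
  let c := ((PySem.Dict.mk cord).get? "c").getD 0
  let badMoves : List Char := []
  let badMoves := if r == 0 then badMoves ++ ['U'] else badMoves
  let badMoves := if r == 3 then badMoves ++ ['D'] else badMoves
  let badMoves := if c == 0 then badMoves ++ ['L'] else badMoves
  let badMoves := if c == 3 then badMoves ++ ['R'] else badMoves
  let badMoves := if last_move != "" then
      (if last_move == "R" then badMoves ++ ['L']
       else if last_move == "L" then badMoves ++ ['R']
       else if last_move == "U" then badMoves ++ ['D']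
       else if last_move == "D" then badMoves ++ ['U']
       else badMoves)
    else badMoves
  let properMoves : List Char :=
    "RLDU".toList.foldl (fun properMoves i =>
      if i ∈ badMoves then properMoves else properMoves ++ [i]) []
  String.ofList properMoves

-- ===== PORT B =====
-- the module-level tuple _TAB
def gm_TAB : List String :=
  ["", "U", "D", "DU", "L", "LU", "LD", "LDU",
   "R", "RU", "RD", "RDU", "RL", "RLU", "RLD", "RLDU"]

-- _TAB[i]: i is always in 0..15 (sum of 8+4+2+1 worth of 0/1 terms), so Python's
-- tuple indexing never raises and pyGet?'s default "" is never used.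
def good_moves_alt (cord : List (String × Int)) (last_move : String) : String :=
  let r := ((PySem.Dict.mk cord).get? "r").getD 0
  let c := ((PySem.Dict.mk cord).get? "c").getD 0
  let i : Int :=
    (if c != 3 && last_move != "L" then 1 else 0) * 8
    + (if c != 0 && last_move != "R" then 1 else 0) * 4
    + (if r != 3 && last_move != "U" then 1 else 0) * 2
    + (if r != 0 && last_move != "D" then 1 else 0) * 1
  (PySem.List.pyGet? gm_TAB i).getD ""

-- ===== PRECONDITION & SPEC =====
-- Pre_ excludes exactly the inputs where Python A raises KeyError (key 'r' or 'c' missing); B raises there too.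
def Pre_good_moves (cord : List (String × Int)) (last_move : String) : Prop :=
  "r" ∈ cord.map Prod.fst ∧ "c" ∈ cord.map Prod.fst
instance (cord : List (String × Int)) (last_move : String) : Decidable (Pre_good_moves cord last_move) := by unfold Pre_good_moves; infer_instance

def pvWitness_good_moves : (List (String × Int)) × String := ([("r", 0), ("c", 2)], "R")

def Spec_good_moves (cord : List (String × Int)) (last_move : String) (out : String) : Prop := out = good_moves_alt cord last_move
instance (cord : List (String × Int)) (last_move : String) (out : String) : Decidable (Spec_good_moves cord last_move out) := by unfold Spec_good_moves; infer_instance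

-- ===== CLAIM (what is proved, stated in full; the proofs are below) =====
def Claim_equal_good_moves : Prop := ∀ (cord : List (String × Int)) (last_move : String), Dom_good_moves cord last_move → Pre_good_moves cord last_move → Spec_good_moves cord last_move (good_moves cord last_move)

-- ===== LEMMAS AND PROOFS =====

-- Both programs read cord only through the 'r' and 'c' lookups: reduce to a canonical two-entry dict.
theorem gm_a_param (cord : List (String × Int)) (lm : String) :
    good_moves cord lm
      = good_moves [("r", ((PySem.Dict.mk cord).get? "r").getD 0),
                    ("c", ((PySem.Dict.mk cord).get? "c").getD 0)] lm := by
  simp only [good_moves, PySem.Dict.get?_mk_cons,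
    show (("r":String) == "r") = true from rfl, show (("c":String) == "r") = false from rfl,
    show (("r":String) == "c") = false from rfl, show (("c":String) == "c") = true from rfl,
    if_true, if_false, Bool.false_eq_true, Option.getD_some]

theorem gm_b_param (cord : List (String × Int)) (lm : String) :
    good_moves_alt cord lm
      = good_moves_alt [("r", ((PySem.Dict.mk cord).get? "r").getD 0),
                        ("c", ((PySem.Dict.mk cord).get? "c").getD 0)] lm := by
  simp only [good_moves_alt, PySem.Dict.get?_mk_cons,
    show (("r":String) == "r") = true from rfl, show (("c":String) == "r") = false from rfl,
    show (("r":String) == "c") = false from rfl, show (("c":String) == "c") = true from rfl,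
    if_true, if_false, Bool.false_eq_true, Option.getD_some]

-- last_move is a move letter or empty: every remaining subterm is decided by the four wall booleans.
set_option maxHeartbeats 1000000 in
theorem gm_fixed (r c : Int) (lm : String) (u d l rr : Bool)
    (h1 : (r == 0) = u) (h2 : (r == 3) = d) (h3 : (c == 0) = l) (h4 : (c == 3) = rr)
    (hlm : lm = "R" ∨ lm = "L" ∨ lm = "U" ∨ lm = "D" ∨ lm = "") :
    good_moves [("r",r),("c",c)] lm = good_moves_alt [("r",r),("c",c)] lm := by
  simp only [good_moves, good_moves_alt, bne, PySem.Dict.get?_mk_cons,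
    show (("r":String) == "r") = true from rfl, show (("c":String) == "r") = false from rfl,
    show (("r":String) == "c") = false from rfl, show (("c":String) == "c") = true from rfl,
    if_true, if_false, Bool.false_eq_true, Option.getD_some, h1, h2, h3, h4]
  rcases hlm with h | h | h | h | h <;> subst h <;>
    cases u <;> cases d <;> cases l <;> cases rr <;> decide

-- last_move is none of 'R','L','U','D','': A's elif chain adds nothing, B's four string tests all pass.
set_option maxHeartbeats 1000000 in
theorem gm_other (r c : Int) (lm : String) (u d l rr : Bool)
    (h1 : (r == 0) = u) (h2 : (r == 3) = d) (h3 : (c == 0) = l) (h4 : (c == 3) = rr)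
    (hR : lm ≠ "R") (hL : lm ≠ "L") (hU : lm ≠ "U") (hD : lm ≠ "D") (hE : lm ≠ "") :
    good_moves [("r",r),("c",c)] lm = good_moves_alt [("r",r),("c",c)] lm := by
  have bR : (lm == "R") = false := beq_eq_false_iff_ne.mpr hR
  have bL : (lm == "L") = false := beq_eq_false_iff_ne.mpr hL
  have bU : (lm == "U") = false := beq_eq_false_iff_ne.mpr hU
  have bD : (lm == "D") = false := beq_eq_false_iff_ne.mpr hD
  have bE : (lm == "") = false := beq_eq_false_iff_ne.mpr hE
  simp only [good_moves, good_moves_alt, bne, PySem.Dict.get?_mk_cons,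
    show (("r":String) == "r") = true from rfl, show (("c":String) == "r") = false from rfl,
    show (("r":String) == "c") = false from rfl, show (("c":String) == "c") = true from rfl,
    if_true, if_false, Bool.false_eq_true, Option.getD_some, h1, h2, h3, h4,
    bR, bL, bU, bD, bE]
  cases u <;> cases d <;> cases l <;> cases rr <;> decide

theorem gm_core (r c : Int) (lm : String) :
    good_moves [("r",r),("c",c)] lm = good_moves_alt [("r",r),("c",c)] lm := by
  by_cases h : lm = "R" ∨ lm = "L" ∨ lm = "U" ∨ lm = "D" ∨ lm = ""
  · exact gm_fixed r c lm _ _ _ _ rfl rfl rfl rfl h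
  · push_neg at h
    obtain ⟨hR, hL, hU, hD, hE⟩ := h
    exact gm_other r c lm _ _ _ _ rfl rfl rfl rfl hR hL hU hD hE

-- ===== VERDICT (by name: the statement is the Claim_ definition above) =====
theorem good_moves_spec : Claim_equal_good_moves := by
  intro cord lm _ _
  unfold Spec_good_moves
  rw [gm_a_param, gm_b_param, gm_core]
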